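-- pv_equiv track=rewrite | github.com/apabon123/futures-six | scripts/run_tsmom_sanity.py | parse_universe
-- ===== SOURCE A (Python) =====
-- from typing import Optional, Dict
--
-- def parse_universe(universe_str: Optional[str]) -> Optional[list]:
--     """
--     Parse comma-separated universe string into list.
--
--     Args:
--         universe_str: Comma-separated string like "ES,NQ,RTY" or None
--
--     Returns:
--         List of symbols or None
--     """
--     if universe_str is None:
--         return None
--
--     # Split by comma and strip whitespace
--     symbols = [s.strip() for s in universe_str.split(',') if s.strip()]
--
--     # Map short names to database symbols
--     # Based on MarketData mapping logic:
--     # - Equities (ES, NQ, RTY): *_FRONT_CALENDAR_2D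
--     # - Rates volume (ZT, ZF, ZN, UB): *_FRONT_VOLUME
--     # - Rates calendar (SR3): SR3_FRONT_CALENDAR
--     # - FX (6E, 6B, 6J): *_FRONT_CALENDAR
--     # - Commodities (CL, GC): *_FRONT_VOLUME
--
--     fx_symbols = {'6E', '6B', '6J'}
--     equity_symbols = {'ES', 'NQ', 'RTY'}
--     rates_volume = {'ZT', 'ZF', 'ZN', 'UB'}
--     rates_calendar = {'SR3'}
--     commodities = {'CL', 'GC'}
--
--     db_symbols = []
--     for sym in symbols:
--         if sym in equity_symbols:
--             db_symbols.append(f"{sym}_FRONT_CALENDAR_2D")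
--         elif sym in rates_volume:
--             db_symbols.append(f"{sym}_FRONT_VOLUME")
--         elif sym in rates_calendar:
--             db_symbols.append(f"{sym}_FRONT_CALENDAR")
--         elif sym in fx_symbols:
--             db_symbols.append(f"{sym}_FRONT_CALENDAR")
--         elif sym in commodities:
--             db_symbols.append(f"{sym}_FRONT_VOLUME")
--         else:
--             # Assume it's already a database symbol
--             db_symbols.append(sym)
--
--     return db_symbols
-- ===== SOURCE B (Python) =====
-- from typing import Optional
--
-- # Suffix per known symbol; unknown symbols get no suffix.
-- _SUFFIX = {
--     'ES': '_FRONT_CALENDAR_2D', 'NQ': '_FRONT_CALENDAR_2D', 'RTY': '_FRONT_CALENDAR_2D',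
--     'ZT': '_FRONT_VOLUME', 'ZF': '_FRONT_VOLUME', 'ZN': '_FRONT_VOLUME', 'UB': '_FRONT_VOLUME',
--     'SR3': '_FRONT_CALENDAR', '6E': '_FRONT_CALENDAR', '6B': '_FRONT_CALENDAR', '6J': '_FRONT_CALENDAR',
--     'CL': '_FRONT_VOLUME', 'GC': '_FRONT_VOLUME',
-- }
--
-- def parse_universe(universe_str):
--     if universe_str is None:
--         return None
--     # Single character-level scan: tokens are built between commas with
--     # whitespace trimmed on the fly (no split()/strip() passes).
--     out = []
--     buf = ''    # current token, leading/trailing whitespace already trimmed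
--     pend = ''   # whitespace seen since the last non-space char of the token
--     for ch in universe_str + ',':
--         if ch == ',':
--             if buf:
--                 out.append(buf + _SUFFIX.get(buf, ''))
--             buf = ''
--             pend = ''
--         elif ch.isspace():
--             if buf:
--                 pend += ch
--         else:
--             buf = buf + pend + ch
--             pend = ''
--     return out
-- ===== Notes on version B (the rewrite author's own statement) =====
-- stated objective: alternative
-- what changed: Replaces A's staged comma-split and strip passes plus a five-way if/elif append loop by a single character-level scan: a small state machine that builds each token between separators with whitespace trimmed on the fly and emits the symbol with its table suffix when the token ends.
import Mathlib
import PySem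

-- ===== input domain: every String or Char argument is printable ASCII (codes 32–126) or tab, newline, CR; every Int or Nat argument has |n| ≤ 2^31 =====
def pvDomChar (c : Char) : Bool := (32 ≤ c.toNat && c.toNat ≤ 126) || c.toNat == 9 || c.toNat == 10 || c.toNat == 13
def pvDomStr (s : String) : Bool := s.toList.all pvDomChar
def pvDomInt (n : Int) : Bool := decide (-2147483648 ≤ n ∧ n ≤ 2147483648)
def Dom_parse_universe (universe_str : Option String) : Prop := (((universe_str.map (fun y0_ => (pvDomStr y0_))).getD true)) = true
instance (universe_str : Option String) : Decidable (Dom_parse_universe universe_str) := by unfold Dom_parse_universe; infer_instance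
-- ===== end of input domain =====

-- B replaces A's split/strip passes plus a five-way if/elif append loop by one character-level
-- scan that trims whitespace on the fly and emits each symbol with its table suffix (objective: alternative).

-- ===== PORT A =====
def pvFx : PySem.Set String := PySem.Set.ofList ["6E", "6B", "6J"]
def pvEquity : PySem.Set String := PySem.Set.ofList ["ES", "NQ", "RTY"]
def pvRatesVolume : PySem.Set String := PySem.Set.ofList ["ZT", "ZF", "ZN", "UB"]
def pvRatesCalendar : PySem.Set String := PySem.Set.ofList ["SR3"]
def pvCommodities : PySem.Set String := PySem.Set.ofList ["CL", "GC"]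

def parse_universe (universe_str : Option String) : Option (List String) :=
  match universe_str with
  | none => none
  | some u =>
    let symbols := (((PySem.Str.split? u ",").getD []).filter
        (fun s => !(PySem.Str.strip s == ""))).map (fun s => PySem.Str.strip s)
    some (symbols.foldl (fun db_symbols sym =>
      if PySem.Set.contains pvEquity sym then db_symbols ++ [sym ++ "_FRONT_CALENDAR_2D"]
      else if PySem.Set.contains pvRatesVolume sym then db_symbols ++ [sym ++ "_FRONT_VOLUME"]
      else if PySem.Set.contains pvRatesCalendar sym then db_symbols ++ [sym ++ "_FRONT_CALENDAR"]
      else if PySem.Set.contains pvFx sym then db_symbols ++ [sym ++ "_FRONT_CALENDAR"]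
      else if PySem.Set.contains pvCommodities sym then db_symbols ++ [sym ++ "_FRONT_VOLUME"]
      else db_symbols ++ [sym]) [])

-- ===== PORT B =====
def pvSuffixTable : PySem.Dict String String :=
  PySem.Dict.ofList [("ES", "_FRONT_CALENDAR_2D"), ("NQ", "_FRONT_CALENDAR_2D"), ("RTY", "_FRONT_CALENDAR_2D"),
    ("ZT", "_FRONT_VOLUME"), ("ZF", "_FRONT_VOLUME"), ("ZN", "_FRONT_VOLUME"), ("UB", "_FRONT_VOLUME"),
    ("SR3", "_FRONT_CALENDAR"), ("6E", "_FRONT_CALENDAR"), ("6B", "_FRONT_CALENDAR"), ("6J", "_FRONT_CALENDAR"),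
    ("CL", "_FRONT_VOLUME"), ("GC", "_FRONT_VOLUME")]

-- one step of B's scanner; state = (out, buf, pend), strings kept as char lists
def pvStepB (st : List String × List Char × List Char) (ch : Char) : List String × List Char × List Char :=
  if ch = ',' then
    ((if st.2.1.isEmpty then st.1
      else st.1 ++ [String.ofList st.2.1 ++ PySem.Dict.getD pvSuffixTable (String.ofList st.2.1) ""]), [], [])
  else if PySem.Chars.isspace ch then
    (st.1, st.2.1, if st.2.1.isEmpty then st.2.2 else st.2.2 ++ [ch])
  else
    (st.1, st.2.1 ++ st.2.2 ++ [ch], [])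

def parse_universe_alt (universe_str : Option String) : Option (List String) :=
  match universe_str with
  | none => none
  | some u => some (((u.toList ++ [',']).foldl pvStepB ([], [], [])).1)

-- ===== PRECONDITION & SPEC =====
def Spec_parse_universe (universe_str : Option String) (out : Option (List String)) : Prop := out = parse_universe_alt universe_str
instance (universe_str : Option String) (out : Option (List String)) : Decidable (Spec_parse_universe universe_str out) := by unfold Spec_parse_universe; infer_instance

-- ===== CLAIM (what is proved, stated in full; the proofs are below) =====
def Claim_equal_parse_universe : Prop := ∀ (universe_str : Option String), Dom_parse_universe universe_str → Spec_parse_universe universe_str (parse_universe universe_str)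

-- ===== LEMMAS AND PROOFS =====

-- B's per-token database name
def pvDbC (t : List Char) : String :=
  String.ofList t ++ PySem.Dict.getD pvSuffixTable (String.ofList t) ""

-- reference single-char split at ','
def pvSplitComma : List Char → List (List Char)
  | [] => [[]]
  | c :: cs =>
    if c = ',' then [] :: pvSplitComma cs
    else match pvSplitComma cs with
      | [] => [[c]]
      | t :: ts => (c :: t) :: ts

def pvMapHead (f : List Char → List Char) : List (List Char) → List (List Char)
  | [] => []
  | t :: ts => f t :: ts

-- scanner emissions, with the out-accumulator factored away
def pvScanGo : List Char → List Char → List Char → List String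
  | [], _, _ => []
  | c :: cs, buf, pend =>
    if c = ',' then (if buf.isEmpty then [] else [pvDbC buf]) ++ pvScanGo cs [] []
    else if PySem.Chars.isspace c then
      pvScanGo cs buf (if buf.isEmpty then pend else pend ++ [c])
    else pvScanGo cs (buf ++ pend ++ [c]) []

-- scanner-state invariant
def pvInv (buf pend : List Char) : Prop :=
  pend.all PySem.Chars.isspace = true ∧ (buf = [] → pend = []) ∧
  List.dropWhile PySem.Chars.isspace buf = buf ∧
  List.dropWhile PySem.Chars.isspace buf.reverse = buf.reverse

lemma pvSplitComma_ne_nil (cs : List Char) : pvSplitComma cs ≠ [] := by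
  cases cs with
  | nil => simp [pvSplitComma]
  | cons c cs =>
    simp only [pvSplitComma]
    split_ifs
    · simp
    · cases h : pvSplitComma cs <;> simp

lemma pvMapHead_id (l : List (List Char)) : pvMapHead (fun t => [] ++ [] ++ t) l = l := by
  cases l <;> simp [pvMapHead]

lemma pvMapHead_pure (l : List (List Char)) : pvMapHead (fun t => t) l = l := by
  cases l <;> simp [pvMapHead]

lemma pv_go_eq (fuel : Nat) (l cur : List Char) (acc : List (List Char)) (h : l.length ≤ fuel) :
    PySem.Chars.splitOn.go [','] fuel l cur acc =
      acc.reverse ++ pvMapHead (fun t => cur.reverse ++ t) (pvSplitComma l) := by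
  induction fuel generalizing l cur acc with
  | zero =>
    have : l = [] := by cases l <;> simp_all
    subst this
    rw [PySem.Chars.splitOn.go]
    simp [pvSplitComma, pvMapHead]
  | succ fuel ih =>
    cases l with
    | nil =>
      rw [PySem.Chars.splitOn.go]
      simp [pvSplitComma, pvMapHead]
      omega
    | cons c rest =>
      rw [PySem.Chars.splitOn.go]
      by_cases hc : c = ','
      · subst hc
        simp only [List.isPrefixOf, BEq.rfl, Bool.true_and, if_true]
        rw [ih _ _ _ (by simpa using Nat.le_of_succ_le_succ (by simpa using h))]
        simp [pvSplitComma, pvMapHead]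
        cases pvSplitComma rest <;> rfl
      · have hpre : [','].isPrefixOf (c :: rest) = false := by
          simp [List.isPrefixOf]
          exact fun hh => absurd hh.symm hc
        simp only [hpre, Bool.false_eq_true, if_false]
        rw [ih _ _ _ (by simpa using Nat.le_of_succ_le_succ (by simpa using h))]
        obtain ⟨t, ts, hts⟩ : ∃ t ts, pvSplitComma rest = t :: ts := by
          cases hx : pvSplitComma rest with
          | nil => exact absurd hx (pvSplitComma_ne_nil rest)
          | cons t ts => exact ⟨t, ts, rfl⟩
        simp [pvSplitComma, hc, hts, pvMapHead]

lemma pv_splitOn_comma (cs : List Char) :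
    PySem.Chars.splitOn cs [','] = pvSplitComma cs := by
  have := pv_go_eq (cs.length + 1) cs [] [] (by omega)
  simpa [PySem.Chars.splitOn, pvMapHead_pure] using this

lemma pv_foldl_scan (l : List Char) (out : List String) (buf pend : List Char) :
    ((l.foldl pvStepB (out, buf, pend)).1) = out ++ pvScanGo l buf pend := by
  induction l generalizing out buf pend with
  | nil => simp [pvScanGo]
  | cons c cs ih =>
    simp only [List.foldl_cons, pvStepB, pvScanGo]
    by_cases hc : c = ','
    · subst hc
      simp only [if_true]
      by_cases hb : buf.isEmpty <;> simp [hb, ih, pvDbC, List.append_assoc]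
    · by_cases hs : PySem.Chars.isspace c = true
      · simp [hc, hs, ih]
      · simp [hc, hs, ih]

lemma pv_strip_nil : PySem.Chars.strip [] = [] := rfl

lemma pv_strip_inv (buf pend : List Char) (h : pvInv buf pend) :
    PySem.Chars.strip (buf ++ pend) = buf := by
  obtain ⟨hall, hnil, hl, hr⟩ := h
  by_cases hb : buf = []
  · subst hb
    rw [hnil rfl]
    rfl
  · have hne : (List.dropWhile PySem.Chars.isspace buf).isEmpty = false := by
      rw [hl]; simpa using hb
    have hall' : pend.reverse.all PySem.Chars.isspace = true := by
      rw [List.all_reverse]; exact hall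
    have hpe : List.dropWhile PySem.Chars.isspace pend.reverse = [] := by
      rw [List.dropWhile_eq_nil_iff]
      exact List.all_eq_true.mp hall' 
    simp only [PySem.Chars.strip, PySem.Chars.lstrip, PySem.Chars.rstrip]
    rw [List.dropWhile_append, hne]
    simp only [Bool.false_eq_true, if_false, hl]
    rw [List.reverse_append, List.dropWhile_append, hpe]
    simp [hr]

lemma pv_strip_cons_space (c : Char) (x : List Char) (h : PySem.Chars.isspace c = true) :
    PySem.Chars.strip (c :: x) = PySem.Chars.strip x := by
  simp [PySem.Chars.strip, PySem.Chars.lstrip, h]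

lemma pvInv_nil : pvInv [] [] := by simp [pvInv]

-- main scanner lemma: emissions = B's db-map of the stripped, nonempty comma-chunks
lemma pv_scan_main (cs : List Char) : ∀ buf pend, pvInv buf pend →
    pvScanGo (cs ++ [',']) buf pend =
      (((pvMapHead (fun t => buf ++ pend ++ t) (pvSplitComma cs)).map PySem.Chars.strip).filter
        (fun t => !t.isEmpty)).map pvDbC := by
  induction cs with
  | nil =>
    intro buf pend h
    have hst := pv_strip_inv buf pend h
    by_cases hb : buf = []
    · have hp : pend = [] := h.2.1 hb
      subst hb; subst hp
      simp [pvScanGo, pvSplitComma, pvMapHead, pv_strip_nil]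
    · have hb' : buf.isEmpty = false := by simpa using hb
      simp [pvScanGo, pvSplitComma, pvMapHead, hst, hb']
  | cons c cs ih =>
    intro buf pend h
    by_cases hc : c = ','
    · subst hc
      have hst := pv_strip_inv buf pend h
      simp only [List.cons_append, pvScanGo, reduceIte, pvSplitComma, pvMapHead,
        List.append_nil]
      rw [ih [] [] pvInv_nil, pvMapHead_id]
      by_cases hb : buf = []
      · have hp : pend = [] := h.2.1 hb
        subst hb; subst hp
        simp [pv_strip_nil]
      · have hb' : buf.isEmpty = false := by simpa using hb
        simp [hst, hb']
    · by_cases hs : PySem.Chars.isspace c = true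
      · obtain ⟨t, ts, hts⟩ : ∃ t ts, pvSplitComma cs = t :: ts := by
          cases hx : pvSplitComma cs with
          | nil => exact absurd hx (pvSplitComma_ne_nil cs)
          | cons t ts => exact ⟨t, ts, rfl⟩
        by_cases hb : buf = []
        · have hp : pend = [] := h.2.1 hb
          subst hb; subst hp
          simp only [List.cons_append, pvScanGo, hc, if_false, hs, if_true,
            List.isEmpty_nil]
          rw [ih [] [] pvInv_nil]
          simp [pvSplitComma, hc, hts, pvMapHead, pv_strip_cons_space c t hs]
        · have hb' : buf.isEmpty = false := by simpa using hb
          have hinv : pvInv buf (pend ++ [c]) := by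
            refine ⟨?_, fun hh => absurd hh hb, h.2.2.1, h.2.2.2⟩
            simp [List.all_append, h.1, hs]
          simp only [List.cons_append, pvScanGo, hc, if_false, hs, if_true, hb',
            Bool.false_eq_true]
          rw [ih buf (pend ++ [c]) hinv]
          simp [pvSplitComma, hc, hts, pvMapHead, List.append_assoc]
      · obtain ⟨t, ts, hts⟩ : ∃ t ts, pvSplitComma cs = t :: ts := by
          cases hx : pvSplitComma cs with
          | nil => exact absurd hx (pvSplitComma_ne_nil cs)
          | cons t ts => exact ⟨t, ts, rfl⟩
        have hinv : pvInv (buf ++ pend ++ [c]) [] := by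
          refine ⟨by simp, by simp, ?_, ?_⟩
          · by_cases hb : buf = []
            · have hp : pend = [] := h.2.1 hb
              subst hb; subst hp
              simp [hs]
            · have hne : (List.dropWhile PySem.Chars.isspace buf).isEmpty = false := by
                rw [h.2.2.1]; simpa using hb
              rw [List.append_assoc, List.dropWhile_append, hne]
              simp [h.2.2.1]
          · rw [List.reverse_append]
            simp only [List.reverse_singleton, List.singleton_append]
            simp [hs]
        simp only [List.cons_append, pvScanGo, hc, if_false, hs, Bool.false_eq_true]
        rw [ih (buf ++ pend ++ [c]) [] hinv]
        simp [pvSplitComma, hc, hts, pvMapHead, List.append_assoc]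

-- A's branch chain on one symbol equals one table lookup
lemma pv_sym_eq (t : String) :
    (if PySem.Set.contains pvEquity t then t ++ "_FRONT_CALENDAR_2D"
     else if PySem.Set.contains pvRatesVolume t then t ++ "_FRONT_VOLUME"
     else if PySem.Set.contains pvRatesCalendar t then t ++ "_FRONT_CALENDAR"
     else if PySem.Set.contains pvFx t then t ++ "_FRONT_CALENDAR"
     else if PySem.Set.contains pvCommodities t then t ++ "_FRONT_VOLUME"
     else t) = t ++ PySem.Dict.getD pvSuffixTable t "" := by
  by_cases h1 : t = "ES"; · subst h1; decide
  by_cases h2 : t = "NQ"; · subst h2; decide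
  by_cases h3 : t = "RTY"; · subst h3; decide
  by_cases h4 : t = "ZT"; · subst h4; decide
  by_cases h5 : t = "ZF"; · subst h5; decide
  by_cases h6 : t = "ZN"; · subst h6; decide
  by_cases h7 : t = "UB"; · subst h7; decide
  by_cases h8 : t = "SR3"; · subst h8; decide
  by_cases h9 : t = "6E"; · subst h9; decide
  by_cases h10 : t = "6B"; · subst h10; decide
  by_cases h11 : t = "6J"; · subst h11; decide
  by_cases h12 : t = "CL"; · subst h12; decide
  by_cases h13 : t = "GC"; · subst h13; decide
  have e1 : ("ES" == t) = false := beq_eq_false_iff_ne.mpr (Ne.symm h1)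
  have e2 : ("NQ" == t) = false := beq_eq_false_iff_ne.mpr (Ne.symm h2)
  have e3 : ("RTY" == t) = false := beq_eq_false_iff_ne.mpr (Ne.symm h3)
  have e4 : ("ZT" == t) = false := beq_eq_false_iff_ne.mpr (Ne.symm h4)
  have e5 : ("ZF" == t) = false := beq_eq_false_iff_ne.mpr (Ne.symm h5)
  have e6 : ("ZN" == t) = false := beq_eq_false_iff_ne.mpr (Ne.symm h6)
  have e7 : ("UB" == t) = false := beq_eq_false_iff_ne.mpr (Ne.symm h7)
  have e8 : ("SR3" == t) = false := beq_eq_false_iff_ne.mpr (Ne.symm h8)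
  have e9 : ("6E" == t) = false := beq_eq_false_iff_ne.mpr (Ne.symm h9)
  have e10 : ("6B" == t) = false := beq_eq_false_iff_ne.mpr (Ne.symm h10)
  have e11 : ("6J" == t) = false := beq_eq_false_iff_ne.mpr (Ne.symm h11)
  have e12 : ("CL" == t) = false := beq_eq_false_iff_ne.mpr (Ne.symm h12)
  have e13 : ("GC" == t) = false := beq_eq_false_iff_ne.mpr (Ne.symm h13)
  simp [pvEquity, pvRatesVolume, pvRatesCalendar, pvFx, pvCommodities,
    PySem.Set.ofList, PySem.Set.contains, PySem.Dict.getD, PySem.Dict.get?, pvSuffixTable,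
    PySem.Dict.ofList, PySem.Dict.update, PySem.Dict.insert, PySem.Dict.empty, List.find?,
    h1, h2, h3, h4, h5, h6, h7, h8, h9, h10, h11, h12, h13,
    e1, e2, e3, e4, e5, e6, e7, e8, e9, e10, e11, e12, e13]

lemma pv_ofList_beq_empty (X : List Char) : (String.ofList X == "") = X.isEmpty := by
  cases X with
  | nil => rfl
  | cons c cs =>
    have h : String.ofList (c :: cs) ≠ "" := by
      intro h
      have h2 := congrArg String.toList h
      simp at h2
    simp [h]

-- A's pipeline, characterised through pvSplitComma
lemma pv_A_eq (s : String) :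
    parse_universe (some s) =
      some (((((pvSplitComma s.toList).map PySem.Chars.strip).filter
        (fun t => !t.isEmpty)).map pvDbC)) := by
  have hsplit : PySem.Str.split? s "," =
      some ((pvSplitComma s.toList).map String.ofList) := by
    simp [PySem.Str.split?, PySem.Chars.split?, pv_splitOn_comma]
  have hstep : (fun (db_symbols : List String) (sym : String) =>
      if PySem.Set.contains pvEquity sym then db_symbols ++ [sym ++ "_FRONT_CALENDAR_2D"]
      else if PySem.Set.contains pvRatesVolume sym then db_symbols ++ [sym ++ "_FRONT_VOLUME"]
      else if PySem.Set.contains pvRatesCalendar sym then db_symbols ++ [sym ++ "_FRONT_CALENDAR"]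
      else if PySem.Set.contains pvFx sym then db_symbols ++ [sym ++ "_FRONT_CALENDAR"]
      else if PySem.Set.contains pvCommodities sym then db_symbols ++ [sym ++ "_FRONT_VOLUME"]
      else db_symbols ++ [sym]) =
      (fun acc sym => acc ++ [sym ++ PySem.Dict.getD pvSuffixTable sym ""]) := by
    funext acc sym
    rw [← pv_sym_eq sym]
    split_ifs <;> rfl
  simp only [parse_universe, hsplit, Option.getD_some, hstep,
    PySem.List.foldl_append_singleton_eq_map, List.nil_append, Option.some_inj]
  rw [List.filter_map, List.filter_map, List.map_map, List.map_map, List.map_map]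
  have hP : ((fun (s : String) => !(PySem.Str.strip s == "")) ∘ String.ofList) =
      ((fun (t : List Char) => !t.isEmpty) ∘ PySem.Chars.strip) := by
    funext t
    simp [Function.comp, PySem.Str.strip, pv_ofList_beq_empty]
  rw [hP]
  apply List.map_congr_left
  intro t _
  simp [Function.comp, PySem.Str.strip, pvDbC]

-- ===== VERDICT (by name: the statement is the Claim_ definition above) =====
theorem parse_universe_spec : Claim_equal_parse_universe := by
  intro u _
  unfold Spec_parse_universe
  cases u with
  | none => rfl
  | some s =>
    rw [pv_A_eq s]
    simp only [parse_universe_alt]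
    rw [pv_foldl_scan, pv_scan_main s.toList [] [] pvInv_nil, pvMapHead_id]
    simp
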